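-- pv_equiv track=rewrite | github.com/Haserjian/assay | src/assay/reporting/evidence_gap.py | _is_test_path
-- ===== SOURCE A (Python) =====
-- def _is_test_path(path: str) -> bool:
--     """Detect if a file path is in a test directory."""
--     parts = path.replace("\\", "/").split("/")
--     for part in parts:
--         if part in ("test", "tests", "testing", "test_utils"):
--             return True
--         if part.startswith("test_") or part.endswith("_test.py"):
--             return True
--     return False
-- ===== SOURCE B (Python) =====
-- def _is_test_path(path: str) -> bool:
--     """Detect if a file path is in a test directory (single pass, no replace/split)."""
--
--     def hit(part):
--         return (part in ("test", "tests", "testing")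
--                 or part.startswith("test_")
--                 or part.endswith("_test.py"))
--
--     cur = []
--     for ch in path:
--         if ch in "/\\":
--             if hit("".join(cur)):
--                 return True
--             cur = []
--         else:
--             cur.append(ch)
--     return hit("".join(cur))
-- ===== Notes on version B (the rewrite author's own statement) =====
-- stated objective: alternative
-- what changed: Single character-level scan that accumulates the current path component and tests it at each separator ('/' or '\') and at the end, instead of building intermediate replaced and split strings; the redundant fourth directory literal of A is subsumed by B's prefix test.
import Mathlib
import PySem

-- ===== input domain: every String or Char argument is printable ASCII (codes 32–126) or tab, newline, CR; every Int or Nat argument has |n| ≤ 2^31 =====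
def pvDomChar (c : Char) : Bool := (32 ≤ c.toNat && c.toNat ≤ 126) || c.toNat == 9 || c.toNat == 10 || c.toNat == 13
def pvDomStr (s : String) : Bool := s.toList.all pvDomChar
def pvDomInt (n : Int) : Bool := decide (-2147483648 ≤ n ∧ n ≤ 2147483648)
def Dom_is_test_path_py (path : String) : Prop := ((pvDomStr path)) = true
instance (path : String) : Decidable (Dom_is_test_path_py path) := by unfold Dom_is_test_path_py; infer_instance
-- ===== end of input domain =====

-- B replaces A's replace-then-split-then-loop with a single character scan that
-- tests each path component at a separator or at the end (alternative decomposition, same cost).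


-- ===== PORT A =====
-- the 'for part in parts' loop of A
def aLoop : List String → Bool
  | [] => false
  | part :: rest =>
    if part = "test" ∨ part = "tests" ∨ part = "testing" ∨ part = "test_utils" then true
    else if PySem.Str.startswith part "test_" || PySem.Str.endswith part "_test.py" then true
    else aLoop rest

def is_test_path_py (path : String) : Bool :=
  -- path.replace("\\","/").split("/"); split with nonempty literal sep ported via Chars.splitOn
  let parts : List String :=
    (PySem.Chars.splitOn (PySem.Str.replace path "\\" "/").toList "/".toList).map String.ofList
  aLoop parts

-- ===== PORT B =====
-- hit(part) of Source B
def hitB (part : List Char) : Bool :=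
  decide (part = "test".toList) || decide (part = "tests".toList) || decide (part = "testing".toList)
    || PySem.Chars.startswith part "test_".toList || PySem.Chars.endswith part "_test.py".toList

-- the scan loop of Source B: cur is the current component, in order; 'ch in "/\\"' ported by hand
-- as the exact two-character disjunction
def scanB : List Char → List Char → Bool
  | cur, [] => hitB cur
  | cur, c :: cs =>
    if c = '/' ∨ c = '\\' then (if hitB cur then true else scanB [] cs)
    else scanB (cur ++ [c]) cs

def is_test_path_py_alt (path : String) : Bool := scanB [] path.toList

-- ===== PRECONDITION & SPEC =====
def Spec_is_test_path_py (path : String) (out : Bool) : Prop := out = is_test_path_py_alt path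
instance (path : String) (out : Bool) : Decidable (Spec_is_test_path_py path out) := by unfold Spec_is_test_path_py; infer_instance

-- ===== CLAIM (what is proved, stated in full; the proofs are below) =====
def Claim_equal_is_test_path_py : Prop := ∀ (path : String), Dom_is_test_path_py path → Spec_is_test_path_py path (is_test_path_py path)

-- ===== LEMMAS AND PROOFS =====

-- the '\\' → '/' substitution, characterwise
def sub (c : Char) : Char := if c = '\\' then '/' else c

-- reference form of splitting on '/'
def mySplit : List Char → List Char → List (List Char)
  | cur, [] => [cur]
  | cur, c :: t => if c = '/' then cur :: mySplit [] t else mySplit (cur ++ [c]) t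

theorem replace_go_eq (fuel : Nat) (l acc : List Char) (h : l.length ≤ fuel) :
    PySem.Chars.replace.go "\\".toList "/".toList fuel l acc = acc.reverse ++ l.map sub := by
  induction fuel generalizing l acc with
  | zero =>
    have : l = [] := List.eq_nil_of_length_eq_zero (Nat.le_zero.mp h)
    subst this; simp [PySem.Chars.replace.go]
  | succ n ih =>
    cases l with
    | nil => simp [PySem.Chars.replace.go]
    | cons c t =>
      simp only [PySem.Chars.replace.go]
      by_cases hc : c = '\\'
      · subst hc
        have hp : List.isPrefixOf "\\".toList ('\\' :: t) = true := by
          simp [show ("\\".toList) = ['\\'] from rfl, List.isPrefixOf]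
        rw [if_pos hp]
        have := ih t ('/' :: acc) (by simpa using Nat.le_of_succ_le_succ h)
        simpa [sub] using this
      · have hp : List.isPrefixOf "\\".toList (c :: t) = false := by
          simp [show ("\\".toList) = ['\\'] from rfl, List.isPrefixOf]
          exact fun hh => absurd hh.symm hc
        rw [if_neg (ne_true_of_eq_false hp)]
        have := ih t (c :: acc) (by simpa using Nat.le_of_succ_le_succ h)
        simpa [sub, hc] using this

theorem splitOn_go_eq (fuel : Nat) (l cur : List Char) (acc : List (List Char)) (h : l.length < fuel) :
    PySem.Chars.splitOn.go "/".toList fuel l cur acc = acc.reverse ++ mySplit cur.reverse l := by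
  induction fuel generalizing l cur acc with
  | zero => omega
  | succ n ih =>
    cases l with
    | nil => simp [PySem.Chars.splitOn.go, mySplit]
    | cons c t =>
      simp only [PySem.Chars.splitOn.go]
      by_cases hc : c = '/'
      · subst hc
        have hp : List.isPrefixOf "/".toList ('/' :: t) = true := by
          simp [show ("/".toList) = ['/'] from rfl, List.isPrefixOf]
        rw [if_pos hp]
        have := ih t [] (cur.reverse :: acc) (by simpa using Nat.lt_of_succ_lt_succ h)
        simpa [mySplit] using this
      · have hp : List.isPrefixOf "/".toList (c :: t) = false := by
          simp [show ("/".toList) = ['/'] from rfl, List.isPrefixOf]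
          exact fun hh => absurd hh.symm hc
        rw [if_neg (ne_true_of_eq_false hp)]
        have := ih t (c :: cur) acc (by simpa using Nat.lt_of_succ_lt_succ h)
        simpa [mySplit, hc] using this

-- A's per-part test as a boolean
def partABool (part : String) : Bool :=
  decide (part = "test") || decide (part = "tests") || decide (part = "testing")
    || decide (part = "test_utils")
    || PySem.Str.startswith part "test_" || PySem.Str.endswith part "_test.py"

theorem aLoop_cons (p : String) (ps : List String) :
    aLoop (p :: ps) = (partABool p || aLoop ps) := by
  simp only [aLoop, partABool]
  by_cases h1 : p = "test" ∨ p = "tests" ∨ p = "testing" ∨ p = "test_utils"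
  · rw [if_pos h1]
    rcases h1 with h | h | h | h <;> simp [h]
  · rw [if_neg h1]
    push Not at h1
    obtain ⟨a1, a2, a3, a4⟩ := h1
    by_cases h2 : (PySem.Str.startswith p "test_" || PySem.Str.endswith p "_test.py") = true
    · rw [if_pos h2]; simp_all
    · rw [if_neg h2]; simp_all

-- the string-level test on a component equals B's char-level hit ("test_utils" is
-- subsumed by the "test_" prefix)
theorem partA_ofList (cs : List Char) : partABool (String.ofList cs) = hitB cs := by
  simp only [partABool, hitB, PySem.Str.startswith_eq, PySem.Str.endswith_eq,
    String.toList_ofList]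
  have key : ∀ t : String, (String.ofList cs = t) = (cs = t.toList) := by
    intro t
    apply propext
    constructor
    · intro h; rw [← h, String.toList_ofList]
    · intro h; apply String.toList_inj.mp; rw [String.toList_ofList, h]
  simp only [key]
  by_cases hu : cs = "test_utils".toList
  · subst hu; decide
  · rw [show ("test_utils".toList) = ['t','e','s','t','_','u','t','i','l','s'] from rfl] at hu
    simp [hu]

theorem mySplit_cons_sep (cur l : List Char) : mySplit cur ('/' :: l) = cur :: mySplit [] l := by
  simp [mySplit]

theorem mySplit_cons_nonsep {c : Char} (h : ¬ c = '/') (cur l : List Char) :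
    mySplit cur (c :: l) = mySplit (cur ++ [c]) l := by
  simp [mySplit, h]

theorem scanB_eq (cs cur : List Char) :
    scanB cur cs = aLoop ((mySplit cur (cs.map sub)).map String.ofList) := by
  induction cs generalizing cur with
  | nil => simp [scanB, mySplit, aLoop_cons, aLoop, partA_ofList]
  | cons c t ih =>
    by_cases hc : c = '/' ∨ c = '\\'
    · have hs : sub c = '/' := by rcases hc with h | h <;> simp [sub, h]
      simp only [scanB, if_pos hc, List.map_cons, hs, mySplit_cons_sep,
        List.map_cons, aLoop_cons, partA_ofList, ih]
      by_cases hh : hitB cur = true <;> simp [hh]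
    · have hc1 : ¬ c = '/' := fun h => hc (Or.inl h)
      have hc2 : ¬ c = '\\' := fun h => hc (Or.inr h)
      have hs : sub c = c := by simp [sub, hc2]
      simp only [scanB, if_neg hc, List.map_cons, hs, mySplit_cons_nonsep hc1]
      exact ih (cur ++ [c])

-- ===== VERDICT (by name: the statement is the Claim_ definition above) =====
theorem is_test_path_py_spec : Claim_equal_is_test_path_py := by
  intro path _
  unfold Spec_is_test_path_py is_test_path_py is_test_path_py_alt
  rw [PySem.Str.toList_replace]
  show aLoop ((PySem.Chars.splitOn (PySem.Chars.replace path.toList "\\".toList "/".toList)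
      "/".toList).map String.ofList) = scanB [] path.toList
  rw [show PySem.Chars.replace path.toList "\\".toList "/".toList = path.toList.map sub by
        rw [PySem.Chars.replace]
        simp only [show ("\\".toList).isEmpty = false by decide, Bool.false_eq_true, if_false]
        simpa using replace_go_eq path.toList.length path.toList [] (le_refl _)]
  rw [show PySem.Chars.splitOn (path.toList.map sub) "/".toList
        = mySplit [] (path.toList.map sub) by
        rw [PySem.Chars.splitOn]
        simpa using splitOn_go_eq ((path.toList.map sub).length + 1) (path.toList.map sub) [] []
          (Nat.lt_succ_self _)]
  rw [scanB_eq]
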